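-- pv_equiv track=rewrite | github.com/easygap/quant_trader | core/strategy_diagnostics.py | fifo_round_trips_chronological
-- ===== SOURCE A (Python) =====
-- from collections import defaultdict, deque
-- from typing import Any, Dict, List, Optional, Sequence, Tuple
--
-- def fifo_round_trips_chronological(
--     items: Sequence[Tuple[str, int]],
-- ) -> int:
--     """
--     (action, qty) 시계열. BUY lot을 deque로 쌓고, SELL 시 앞 lot부터 소진.
--     한 BUY lot이 완전히 매도되면 왕복 1회.
--     action: BUY 또는 SELL(계열 통일 upper).
--     """
--     lots: deque[int] = deque()
--     trips = 0
--     for action, qty in items: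
--         a = (action or "").upper()
--         q = int(qty or 0)
--         if q <= 0:
--             continue
--         if a == "BUY":
--             lots.append(q)
--             continue
--         if (
--             "SELL" in a
--             or a in ("STOP_LOSS", "TAKE_PROFIT", "TAKE_PROFIT_PARTIAL", "TRAILING_STOP", "MAX_HOLD")
--         ):
--             rem = q
--             while rem > 0 and lots:
--                 top = lots[0]
--                 if top <= rem:
--                     rem -= top
--                     lots.popleft()
--                     trips += 1
--                 else:
--                     lots[0] = top - rem
--                     rem = 0
--     return trips
-- ===== SOURCE B (Python) =====
-- def fifo_round_trips_chronological(items):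
--     # One pass: record cumulative buy boundaries and a single consumed counter,
--     # then count the boundaries fully covered by the consumed quantity.
--     boundaries = []
--     cum_buy = 0
--     consumed = 0
--     for action, qty in items:
--         a = (action or "").upper()
--         q = int(qty or 0)
--         if q <= 0:
--             continue
--         if a == "BUY":
--             cum_buy += q
--             boundaries.append(cum_buy)
--         elif (
--             "SELL" in a
--             or a in ("STOP_LOSS", "TAKE_PROFIT", "TAKE_PROFIT_PARTIAL", "TRAILING_STOP", "MAX_HOLD")
--         ):
--             consumed += min(q, cum_buy - consumed)
--     return sum(1 for b in boundaries if b <= consumed)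
-- ===== Notes on version B (the rewrite author's own statement) =====
-- stated objective: alternative
-- what changed: Replaces the mutable FIFO deque and per-sell draining while-loop by a single pass that records cumulative buy boundaries and one scalar consumed counter (consumed += min(q, cum_buy - consumed)), returning the number of boundaries covered by consumed.
import Mathlib
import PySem

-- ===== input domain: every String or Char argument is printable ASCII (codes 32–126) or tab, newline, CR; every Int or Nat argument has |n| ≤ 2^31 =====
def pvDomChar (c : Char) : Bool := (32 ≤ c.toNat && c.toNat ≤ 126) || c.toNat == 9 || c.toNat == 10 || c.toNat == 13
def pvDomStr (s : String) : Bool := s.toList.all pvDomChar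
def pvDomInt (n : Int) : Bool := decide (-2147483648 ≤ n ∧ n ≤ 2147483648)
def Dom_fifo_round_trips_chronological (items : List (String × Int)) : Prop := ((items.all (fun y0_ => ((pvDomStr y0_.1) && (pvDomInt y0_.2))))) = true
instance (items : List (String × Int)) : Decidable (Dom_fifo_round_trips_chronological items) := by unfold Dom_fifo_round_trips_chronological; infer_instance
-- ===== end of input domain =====

-- B replaces A's FIFO deque simulation by cumulative buy boundaries plus a scalar
-- consumed counter (an alternative one-pass decomposition, not claimed faster).


-- ===== PORT A =====
-- the `while rem > 0 and lots:` drain loop of A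
def fifoDrain (rem : Int) (lots : List Int) (trips : Int) : List Int × Int :=
  if 0 < rem then
    match lots with
    | [] => (lots, trips)
    | top :: rest =>
      if top ≤ rem then fifoDrain (rem - top) rest (trips + 1)
      else ((top - rem) :: rest, trips)
  else (lots, trips)
  termination_by lots.length

-- one iteration of A's `for action, qty in items:` loop; state = (lots, trips)
def fifoStepA (st : List Int × Int) (item : String × Int) : List Int × Int :=
  let a := PySem.Str.upper item.1          -- (action or "").upper()
  let q := item.2                          -- int(qty or 0) = qty for int qty
  if q ≤ 0 then st
  else if a = "BUY" then (st.1 ++ [q], st.2)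
  else if PySem.Str.isIn "SELL" a
          || decide (a ∈ ["STOP_LOSS", "TAKE_PROFIT", "TAKE_PROFIT_PARTIAL", "TRAILING_STOP", "MAX_HOLD"]) then
    fifoDrain q st.1 st.2
  else st

def fifo_round_trips_chronological (items : List (String × Int)) : Int :=
  (items.foldl fifoStepA ([], 0)).2

-- ===== PORT B =====
-- one iteration of B's loop; state = (boundaries, cum_buy, consumed)
def fifoStepB (st : List Int × Int × Int) (item : String × Int) : List Int × Int × Int :=
  let a := PySem.Str.upper item.1          -- (action or "").upper()
  let q := item.2                          -- int(qty or 0) = qty for int qty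
  if q ≤ 0 then st
  else if a = "BUY" then (st.1 ++ [st.2.1 + q], st.2.1 + q, st.2.2)
  else if PySem.Str.isIn "SELL" a
          || decide (a ∈ ["STOP_LOSS", "TAKE_PROFIT", "TAKE_PROFIT_PARTIAL", "TRAILING_STOP", "MAX_HOLD"]) then
    (st.1, st.2.1, st.2.2 + min q (st.2.1 - st.2.2))
  else st

def fifo_round_trips_chronological_alt (items : List (String × Int)) : Int :=
  let st := items.foldl fifoStepB ([], 0, 0)
  -- sum(1 for b in boundaries if b <= consumed)
  (st.1.countP (fun b => decide (b ≤ st.2.2)) : Int)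

-- ===== PRECONDITION & SPEC =====
def Spec_fifo_round_trips_chronological (items : List (String × Int)) (out : Int) : Prop := out = fifo_round_trips_chronological_alt items
instance (items : List (String × Int)) (out : Int) : Decidable (Spec_fifo_round_trips_chronological items out) := by unfold Spec_fifo_round_trips_chronological; infer_instance

-- ===== CLAIM (what is proved, stated in full; the proofs are below) =====
def Claim_equal_fifo_round_trips_chronological : Prop := ∀ (items : List (String × Int)), Dom_fifo_round_trips_chronological items → Spec_fifo_round_trips_chronological items (fifo_round_trips_chronological items)

-- ===== LEMMAS AND PROOFS =====

-- boundaries → lot sizes: toQty p [b1, b2, …] = [b1 - p, b2 - b1, …]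
def toQty (prev : Int) : List Int → List Int
  | [] => []
  | b :: rest => (b - prev) :: toQty b rest

-- A's deque as reconstructed from B's state: skip fully-consumed boundaries,
-- the first live lot is reduced by the consumed overhang.
def lotsOf (c : Int) : List Int → List Int
  | [] => []
  | b :: rest => if b ≤ c then lotsOf c rest else toQty c (b :: rest)

-- last element of a boundaries list (default d); tracks B's cum_buy
def lastB (d : Int) : List Int → Int
  | [] => d
  | b :: rest => lastB b rest

-- the simulation invariant between A's state and B's state
def FifoInv (st : List Int × Int) (t : List Int × Int × Int) : Prop :=
  st.1 = lotsOf t.2.2 t.1 ∧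
  st.2 = (t.1.countP (fun b => decide (b ≤ t.2.2)) : Int) ∧
  t.2.1 = lastB 0 t.1 ∧
  0 ≤ t.2.2 ∧ t.2.2 ≤ t.2.1 ∧
  t.1.Pairwise (· < ·)

theorem lastB_mem (d : Int) (l : List Int) : lastB d l = d ∨ lastB d l ∈ l := by
  induction l generalizing d with
  | nil => left; rfl
  | cons b rest ih =>
    rcases ih b with h | h
    · right; simp [lastB, h]
    · right; simp [lastB]; right; exact h

theorem lastB_ge (l : List Int) (d : Int) (h : ∀ x ∈ l, d ≤ x) : d ≤ lastB d l := by
  rcases lastB_mem d l with he | he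
  · omega
  · exact h _ he

theorem le_lastB (l : List Int) (d : Int) (hp : l.Pairwise (· < ·)) :
    ∀ x ∈ l, x ≤ lastB d l := by
  induction l generalizing d with
  | nil => simp
  | cons b rest ih =>
    intro x hx
    rcases List.mem_cons.1 hx with h | h
    · subst h
      show x ≤ lastB x rest
      exact lastB_ge rest x (fun y hy => le_of_lt ((List.pairwise_cons.1 hp).1 y hy))
    · exact ih b (List.pairwise_cons.1 hp).2 x h

theorem toQty_append (l : List Int) (p x : Int) :
    toQty p (l ++ [x]) = toQty p l ++ [x - lastB p l] := by
  induction l generalizing p with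
  | nil => simp [toQty, lastB]
  | cons b rest ih => simp [toQty, ih, lastB]

theorem lotsOf_eq_toQty (l : List Int) (c : Int) (h : ∀ x ∈ l, c < x) :
    lotsOf c l = toQty c l := by
  cases l with
  | nil => rfl
  | cons b rest => simp [lotsOf, toQty, not_le.2 (h b (by simp))]

theorem lotsOf_append (bnd : List Int) (c q : Int) : ∀ d : Int, bnd.Pairwise (· < ·) →
    0 < q → d ≤ c → c ≤ lastB d bnd →
    lotsOf c (bnd ++ [lastB d bnd + q]) = lotsOf c bnd ++ [q] := by
  induction bnd with
  | nil =>
    intro d _ hq hdc hcL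
    simp [lastB] at hcL
    have : c = d := le_antisymm hcL hdc
    subst this
    simp [lotsOf, toQty, lastB]
    omega
  | cons b rest ih =>
    intro d hp hq hdc hcL
    show lotsOf c (b :: (rest ++ [lastB b rest + q])) = _
    by_cases hbc : b ≤ c
    · have h1 : lotsOf c (b :: (rest ++ [lastB b rest + q])) = lotsOf c (rest ++ [lastB b rest + q]) := by
        simp [lotsOf, hbc]
      rw [h1, ih b (List.pairwise_cons.1 hp).2 hq hbc hcL]
      simp [lotsOf, hbc]
    · have h1 : lotsOf c (b :: (rest ++ [lastB b rest + q])) = toQty c (b :: (rest ++ [lastB b rest + q])) := by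
        simp [lotsOf, hbc]
      rw [h1]
      show (b - c) :: toQty b (rest ++ [lastB b rest + q]) = _
      rw [toQty_append]
      simp [lotsOf, hbc, toQty]

theorem drain_spec (bnd : List Int) : ∀ (c q t d : Int), bnd.Pairwise (· < ·) →
    d ≤ c → c ≤ lastB d bnd → 0 < q →
    fifoDrain q (lotsOf c bnd) t =
      (lotsOf (c + min q (lastB d bnd - c)) bnd,
       t + ((bnd.countP (fun b => decide (b ≤ c + min q (lastB d bnd - c))) : Int)
            - (bnd.countP (fun b => decide (b ≤ c)) : Int))) := by
  induction bnd with
  | nil =>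
    intro c q t d _ hdc hcL hq
    simp [lastB] at hcL ⊢
    have hc : c = d := le_antisymm hcL hdc
    subst hc
    have : min q 0 = 0 := by omega
    simp [this, lotsOf, fifoDrain, hq]
  | cons b rest ih =>
    intro c q t d hp hdc hcL hq
    have hpr := (List.pairwise_cons.1 hp).2
    have hgt : ∀ x ∈ rest, b < x := (List.pairwise_cons.1 hp).1
    have hbL : b ≤ lastB b rest := lastB_ge rest b (fun x hx => le_of_lt (hgt x hx))
    have hLcons : lastB d (b :: rest) = lastB b rest := rfl
    -- countP of rest vanishes below any threshold < every element
    have hzero : ∀ e : Int, e < b → rest.countP (fun x => decide (x ≤ e)) = 0 := by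
      intro e he
      exact List.countP_eq_zero.2 (fun x hx => by simpa using by have := hgt x hx; omega)
    have hzb : rest.countP (fun x => decide (x ≤ b)) = 0 :=
      List.countP_eq_zero.2 (fun x hx => by simpa using by have := hgt x hx; omega)
    rw [hLcons] at hcL ⊢
    by_cases hbc : b ≤ c
    · have h1 : lotsOf c (b :: rest) = lotsOf c rest := by simp [lotsOf, hbc]
      rw [h1, ih c q t b hpr hbc hcL hq]
      have hmin : 0 ≤ min q (lastB b rest - c) := by omega
      have h2 : lotsOf (c + min q (lastB b rest - c)) (b :: rest)
          = lotsOf (c + min q (lastB b rest - c)) rest := by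
        simp [lotsOf]; omega
      rw [h2]
      simp [List.countP_cons, show decide (b ≤ c + min q (lastB b rest - c)) = true by simp; omega,
            show decide (b ≤ c) = true by simpa using hbc]

    · push_neg at hbc
      have h1 : lotsOf c (b :: rest) = (b - c) :: lotsOf b rest := by
        simp [lotsOf, toQty, not_le.2 hbc, lotsOf_eq_toQty rest b hgt]
      rw [h1]
      rw [show fifoDrain q ((b - c) :: lotsOf b rest) t
            = if b - c ≤ q then fifoDrain (q - (b - c)) (lotsOf b rest) (t + 1)
              else ((b - c - q) :: lotsOf b rest, t) by rw [fifoDrain]; simp [hq]]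
      by_cases h1q : b - c ≤ q
      · rw [if_pos h1q]
        by_cases h2q : 0 < q - (b - c)
        · rw [show q - (b - c) = q - b + c by ring] at h2q ⊢
          rw [ih b (q - b + c) (t + 1) b hpr le_rfl hbL h2q]
          have hc'' : b + min (q - b + c) (lastB b rest - b) = c + min q (lastB b rest - c) := by omega
          have hble : b ≤ c + min q (lastB b rest - c) := by omega
          have h3 : lotsOf (c + min q (lastB b rest - c)) (b :: rest)
              = lotsOf (c + min q (lastB b rest - c)) rest := by simp [lotsOf]; omega
          rw [hc'', h3]
          simp [List.countP_cons, hzb, hzero c hbc,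
                show decide (b ≤ c + min q (lastB b rest - c)) = true by simp; omega,
                show decide (b ≤ c) = false by simp; omega]
          push_cast
          ring_nf
        · have hq0 : q = b - c := by omega
          have hd0 : fifoDrain (q - (b - c)) (lotsOf b rest) (t + 1) = (lotsOf b rest, t + 1) := by
            rw [fifoDrain.eq_def, if_neg h2q]
          rw [hd0]
          have hc' : c + min q (lastB b rest - c) = b := by omega
          rw [hc']
          have h3 : lotsOf b (b :: rest) = lotsOf b rest := by simp [lotsOf]
          rw [h3]
          simp [List.countP_cons, hzb, hzero c hbc,
                show decide (b ≤ b) = true by simp,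
                show decide (b ≤ c) = false by simp; omega]
      · rw [if_neg h1q]
        have hc' : c + min q (lastB b rest - c) = c + q := by omega
        rw [hc']
        have h3 : lotsOf (c + q) (b :: rest) = (b - (c + q)) :: lotsOf b rest := by
          simp [lotsOf, toQty, show ¬ b ≤ c + q by omega, lotsOf_eq_toQty rest b hgt]
        rw [h3]
        simp [List.countP_cons, hzero c hbc, hzero (c + q) (by omega),
              show decide (b ≤ c + q) = false by simp; omega,
              show decide (b ≤ c) = false by simp; omega]
        omega

theorem lastB_append (l : List Int) (d x : Int) : lastB d (l ++ [x]) = x := by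
  induction l generalizing d with
  | nil => rfl
  | cons b rest ih => exact ih b

theorem step_inv (st : List Int × Int) (t : List Int × Int × Int) (item : String × Int)
    (h : FifoInv st t) : FifoInv (fifoStepA st item) (fifoStepB t item) := by
  obtain ⟨lots, trips⟩ := st
  obtain ⟨bnd, cum, cons⟩ := t
  obtain ⟨h1, h2, h3, h4, h5, h6⟩ := h
  simp only [FifoInv] at h1 h2 h3 h4 h5 h6 ⊢
  simp only [fifoStepA, fifoStepB]
  by_cases hq : item.2 ≤ 0
  · simp only [if_pos hq]
    exact ⟨h1, h2, h3, h4, h5, h6⟩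
  · simp only [if_neg hq]
    push_neg at hq
    by_cases hbuy : PySem.Str.upper item.1 = "BUY"
    · simp only [if_pos hbuy]
      refine ⟨?_, ?_, ?_, h4, by omega, ?_⟩
      · rw [h3, lotsOf_append bnd cons item.2 0 h6 hq h4 (h3 ▸ h5), ← h1]
      · simp only [List.countP_append, List.countP_cons, List.countP_nil]
        have : decide (cum + item.2 ≤ cons) = false := by simp; omega
        simp [this, h2]
      · simp [lastB_append]
      · rw [List.pairwise_append]
        refine ⟨h6, by simp, ?_⟩
        intro x hx y hy
        simp at hy
        subst hy
        have := le_lastB bnd 0 h6 x hx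
        omega
    · simp only [if_neg hbuy]
      by_cases hsell : (PySem.Str.isIn "SELL" (PySem.Str.upper item.1)
          || decide (PySem.Str.upper item.1 ∈ ["STOP_LOSS", "TAKE_PROFIT", "TAKE_PROFIT_PARTIAL", "TRAILING_STOP", "MAX_HOLD"])) = true
      · simp only [if_pos hsell]
        rw [h1, h2, drain_spec bnd cons item.2 _ 0 h6 h4 (h3 ▸ h5) hq]
        rw [← h3]
        refine ⟨rfl, by push_cast; ring, rfl, by omega, by omega, h6⟩
      · simp only [if_neg hsell]
        exact ⟨h1, h2, h3, h4, h5, h6⟩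

theorem fold_inv (items : List (String × Int)) (st : List Int × Int) (t : List Int × Int × Int)
    (h : FifoInv st t) : FifoInv (items.foldl fifoStepA st) (items.foldl fifoStepB t) := by
  induction items generalizing st t with
  | nil => exact h
  | cons it rest ih => exact ih _ _ (step_inv st t it h)

-- ===== VERDICT (by name: the statement is the Claim_ definition above) =====
theorem fifo_round_trips_chronological_spec : Claim_equal_fifo_round_trips_chronological := by
  intro items _
  unfold Spec_fifo_round_trips_chronological fifo_round_trips_chronological fifo_round_trips_chronological_alt
  have h := fold_inv items ([], 0) ([], 0, 0) (by simp [FifoInv, lotsOf, lastB])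
  exact h.2.1
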